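-- pv_equiv track=rewrite | github.com/sonkeehoon/Python | 2/B2775.py | apart
-- ===== SOURCE A (Python) =====
-- def apart(k,n):
--     k+=1
--     res1=[]
--     for i in range(k):
--         line=[]
--         for j in range(n):
--             line.append(0)
--         res1.append(line)
--     res1[0]=[_ for _ in range(1,n+1)]
--     for i in range(k):
--         res1[i][0]=1
--     for i in range(1,k):
--         for j in range(1,n):
--             res1[i][j]=sum(res1[i-1][:j+1])
--     return res1[k-1][n-1]
-- ===== SOURCE B (Python) =====
-- def apart(k, n):
--     # One-dimensional rolling row: apply a running prefix-sum pass k times.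
--     row = list(range(1, n + 1))
--     for _ in range(k):
--         acc = 0
--         new = []
--         for x in row:
--             acc += x
--             new.append(acc)
--         row = new
--     return row[-1]
-- ===== Notes on version B (the rewrite author's own statement) =====
-- stated objective: faster
-- what changed: Replaces the (k+1) x n DP table whose each cell re-sums a slice of the previous row by a single rolling row updated k times with a running prefix sum, so no slice is ever re-summed.
import Mathlib
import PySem

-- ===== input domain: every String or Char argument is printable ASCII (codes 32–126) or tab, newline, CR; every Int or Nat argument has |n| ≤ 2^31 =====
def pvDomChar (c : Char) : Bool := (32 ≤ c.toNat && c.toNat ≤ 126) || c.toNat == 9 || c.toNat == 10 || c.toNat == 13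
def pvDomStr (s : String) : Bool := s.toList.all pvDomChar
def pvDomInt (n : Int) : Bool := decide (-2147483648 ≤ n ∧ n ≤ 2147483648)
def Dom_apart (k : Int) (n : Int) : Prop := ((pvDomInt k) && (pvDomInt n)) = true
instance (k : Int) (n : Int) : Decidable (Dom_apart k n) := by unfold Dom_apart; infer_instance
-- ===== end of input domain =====

-- B replaces A's (k+1)×n DP table (each cell re-sums a slice of the previous row) by a single
-- rolling row updated k times with a running prefix sum (objective: faster, O(k·n) vs O(k·n²)).

-- ===== PORT A =====
def apart (k : Int) (n : Int) : Int :=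
  let k2 := k + 1
  let res1 : List (List Int) :=
    (PySem.List.pyRange 0 k2 1).foldl (fun res1 _i =>
      res1 ++ [(PySem.List.pyRange 0 n 1).foldl (fun line _j => line ++ [(0 : Int)]) []]) []
  let res2 := PySem.List.pySetD res1 0 ((PySem.List.pyRange 1 (n+1) 1).map (fun x => x))
  let res3 := (PySem.List.pyRange 0 k2 1).foldl (fun r i =>
      PySem.List.pySetD r i (PySem.List.pySetD (PySem.List.pyGetD r i []) 0 1)) res2
  let res4 := (PySem.List.pyRange 1 k2 1).foldl (fun r i =>
      (PySem.List.pyRange 1 n 1).foldl (fun r j =>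
        PySem.List.pySetD r i (PySem.List.pySetD (PySem.List.pyGetD r i []) j
          ((PySem.List.slice (PySem.List.pyGetD r (i-1) []) none (some (j+1))).sum))) r) res3
  PySem.List.pyGetD (PySem.List.pyGetD res4 (k2-1) []) (n-1) 0

-- ===== PORT B =====
def apart_alt (k : Int) (n : Int) : Int :=
  let row0 := PySem.List.pyRange 1 (n+1) 1
  let rowF := (PySem.List.pyRange 0 k 1).foldl (fun row _ =>
      (row.foldl (fun (p : Int × List Int) x => (p.1 + x, p.2 ++ [p.1 + x]))
        ((0 : Int), ([] : List Int))).2) row0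
  PySem.List.pyGetD rowF (-1) 0

-- ===== PRECONDITION & SPEC =====
-- Pre_ excludes exactly the inputs where Python A raises IndexError: k < 0 (the table is empty,
-- `res1[0] = ...` fails) or n < 1 (rows are empty, `res1[i][0] = 1` fails).
def Pre_apart (k : Int) (n : Int) : Prop := 0 ≤ k ∧ 1 ≤ n
instance (k : Int) (n : Int) : Decidable (Pre_apart k n) := by unfold Pre_apart; infer_instance
def pvWitness_apart : Int × Int := (2, 3)

def Spec_apart (k : Int) (n : Int) (out : Int) : Prop := out = apart_alt k n
instance (k : Int) (n : Int) (out : Int) : Decidable (Spec_apart k n out) := by unfold Spec_apart; infer_instance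

-- ===== CLAIM (what is proved, stated in full; the proofs are below) =====
def Claim_equal_apart : Prop := ∀ (k : Int) (n : Int), Dom_apart k n → Pre_apart k n → Spec_apart k n (apart k n)

-- ===== LEMMAS AND PROOFS =====

-- B's one prefix-sum pass over a row.
def prefRow (r : List Int) : List Int :=
  (r.foldl (fun (p : Int × List Int) x => (p.1 + x, p.2 ++ [p.1 + x])) ((0 : Int), ([] : List Int))).2

-- the row [1, 0, …, 0] (length n) that each not-yet-processed table row holds after A's col-0 loop
def rowE (n : Int) : List Int := 1 :: List.replicate (n.toNat - 1) 0

-- the sequence of finished rows: row i of A's finished table = gg n i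
def gg (n : Int) : Nat → List Int
  | 0 => PySem.List.pyRange 1 (n+1) 1
  | m+1 => prefRow (gg n m)

lemma pref_spec : ∀ (r : List Int) (acc : Int) (out : List Int),
    (r.foldl (fun (p : Int × List Int) x => (p.1 + x, p.2 ++ [p.1 + x])) (acc, out)).2
    = out ++ (List.range r.length).map (fun m => acc + (r.take (m+1)).sum) := by
  intro r
  induction r with
  | nil => intro acc out; simp
  | cons x r ih =>
    intro acc out
    simp only [List.foldl_cons]
    rw [ih]
    simp only [List.length_cons]
    rw [List.range_succ_eq_map, List.map_cons, List.map_map, List.append_assoc,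
      List.singleton_append]
    congr 1
    congr 1
    · simp
    · apply List.map_congr_left
      intro m _
      simp [Function.comp, add_assoc]

lemma pref_eq (r : List Int) :
    prefRow r = (List.range r.length).map (fun m => (r.take (m+1)).sum) := by
  unfold prefRow; rw [pref_spec]; simp

lemma pref_length (r : List Int) : (prefRow r).length = r.length := by simp [pref_eq]

lemma gg_length (n : Int) (hn : 1 ≤ n) : ∀ m, (gg n m).length = n.toNat := by
  intro m
  induction m with
  | zero => simp [gg, PySem.List.length_pyRange_one]
  | succ m ih => simp [gg, pref_length, ih]

lemma gg_take1 (n : Int) (hn : 1 ≤ n) : ∀ m, (gg n m).take 1 = [1] := by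
  intro m
  induction m with
  | zero =>
    show (PySem.List.pyRange 1 (n+1) 1).take 1 = [1]
    rw [PySem.List.pyRange_one_cons (by omega : (1:Int) < n+1)]
    simp
  | succ m ih =>
    show (prefRow (gg n m)).take 1 = [1]
    rw [pref_eq, gg_length n hn m, show n.toNat = (n.toNat - 1) + 1 from by omega,
      List.range_succ_eq_map]
    simp [ih]

lemma set_append_len {α : Type} (A : List α) (x v : α) (B : List α) :
    (A ++ x :: B).set A.length v = A ++ v :: B := by
  induction A with
  | nil => rfl
  | cons a A ih => simp [ih]

lemma getD_append_len {α : Type} (A : List α) (x : α) (B : List α) (d : α) :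
    (A ++ x :: B).getD A.length d = x := by
  induction A with
  | nil => rfl
  | cons a A ih => simp [ih]

lemma mapIdx_fun_const {α β : Type} (h : Nat → β) :
    ∀ (l : List α), l.mapIdx (fun m _ => h m) = (List.range l.length).map h := by
  intro l
  induction l generalizing h with
  | nil => simp
  | cons a l ih =>
    simp only [List.mapIdx_cons, List.length_cons, List.range_succ_eq_map, List.map_cons,
      List.map_map]
    rw [ih (fun m => h (m+1))]
    rfl

lemma mapIdx_fun_id {α β : Type} (f : α → β) :
    ∀ (l : List α), l.mapIdx (fun _ x => f x) = l.map f := by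
  intro l
  induction l with
  | nil => simp
  | cons a l ih => simp only [List.mapIdx_cons, List.map_cons]; rw [ih]

-- generic "for i in range(L, L+len(suf)): xs[i] = f(i, xs[i])" loop over the suffix of pre ++ suf
lemma setmap_loop {α : Type} (d : α) (f : Int → α → α) :
    ∀ (suf pre : List α),
    ((PySem.List.pyRange (pre.length : Int) ((pre.length : Int) + (suf.length : Int)) 1).foldl
      (fun r i => PySem.List.pySetD r i (f i (PySem.List.pyGetD r i d))) (pre ++ suf))
    = pre ++ suf.mapIdx (fun m x => f ((pre.length : Int) + (m : Int)) x) := by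
  intro suf
  induction suf with
  | nil =>
    intro pre
    simp [PySem.List.pyRange_one_eq_nil (le_refl (pre.length : Int))]
  | cons x suf ih =>
    intro pre
    have hL : (pre.length : Int) < (pre.length : Int) + ((x :: suf).length : Int) := by
      simp only [List.length_cons]; push_cast; omega
    rw [PySem.List.pyRange_one_cons hL, List.foldl_cons,
      PySem.List.pyGetD_natCast, getD_append_len, PySem.List.pySetD_natCast, set_append_len]
    have hpre : (((pre ++ [f (pre.length : Int) x]).length : Nat) : Int) = (pre.length : Int) + 1 := by
      simp
    have hend : (pre.length : Int) + ((x :: suf).length : Int)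
        = ((pre ++ [f (pre.length : Int) x]).length : Int) + (suf.length : Int) := by
      simp only [List.length_cons, List.length_append, List.length_nil]; push_cast; ring
    rw [hend, show pre ++ f (pre.length : Int) x :: suf
        = (pre ++ [f (pre.length : Int) x]) ++ suf from by simp,
      show (pre.length : Int) + 1 = ((pre ++ [f (pre.length : Int) x]).length : Int) from by simp,
      ih (pre ++ [f (pre.length : Int) x])]
    rw [List.mapIdx_cons]
    have hfun : (fun (m : Nat) (y : α) => f (((pre ++ [f (pre.length : Int) x]).length : Int) + (m : Int)) y)
        = (fun (m : Nat) (y : α) => f ((pre.length : Int) + ((m+1 : Nat) : Int)) y) := by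
      funext m y; congr 1
      simp only [List.length_append, List.length_cons, List.length_nil]
      push_cast; ring
    rw [hfun]
    simp

-- A's inner j-loop touches only row i; seen from outside it rewrites row i in place.
lemma row_local (i : Int) (iN : Nat) (hi : (iN : Int) = i) (hi1 : 1 ≤ i)
    (t0 : List (List Int)) (hlen : iN < t0.length) :
    ∀ (js : List Int) (c : List Int),
    (js.foldl (fun r j => PySem.List.pySetD r i (PySem.List.pySetD (PySem.List.pyGetD r i []) j
        ((PySem.List.slice (PySem.List.pyGetD r (i-1) []) none (some (j+1))).sum))) (t0.set iN c))
    = t0.set iN (js.foldl (fun row j => PySem.List.pySetD row j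
        ((PySem.List.slice (PySem.List.pyGetD t0 (i-1) []) none (some (j+1))).sum)) c) := by
  intro js
  induction js with
  | nil => intro c; rfl
  | cons j js ihj =>
    intro c
    simp only [List.foldl_cons]
    have hiN1 : 1 ≤ iN := by omega
    have e1 : PySem.List.pyGetD (t0.set iN c) (i-1) ([] : List Int)
        = PySem.List.pyGetD t0 (i-1) [] := by
      rw [show i - 1 = ((iN - 1 : Nat) : Int) from by omega,
        PySem.List.pyGetD_natCast, PySem.List.pyGetD_natCast]
      simp [List.getD_eq_getElem?_getD, List.getElem?_set_ne (show iN ≠ iN - 1 from by omega)]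
    have e2 : PySem.List.pyGetD (t0.set iN c) i ([] : List Int) = c := by
      rw [← hi, PySem.List.pyGetD_natCast]
      simp [List.getD_eq_getElem?_getD, hlen]
    have e3 : ∀ v : List Int, PySem.List.pySetD (t0.set iN c) i v = t0.set iN v := by
      intro v
      rw [← hi, PySem.List.pySetD_natCast, List.set_set]
    rw [e1, e2, e3]
    exact ihj _

-- one outer iteration: with rows 0..i-1 finished and row i still rowE, the j-loop turns row i
-- into the prefix-sum row of row i-1.
lemma inner_step (n : Int) (hn : 1 ≤ n) (prev : List Int)
    (hpl : prev.length = n.toNat) (hp1 : prev.take 1 = [1])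
    (i : Int) (iN : Nat) (hi : (iN : Int) = i) (hi1 : 1 ≤ i)
    (A B' : List (List Int)) (hA : A.length = iN)
    (hprev : PySem.List.pyGetD (A ++ rowE n :: B') (i-1) [] = prev) :
    ((PySem.List.pyRange 1 n 1).foldl
      (fun r j => PySem.List.pySetD r i (PySem.List.pySetD (PySem.List.pyGetD r i []) j
        ((PySem.List.slice (PySem.List.pyGetD r (i-1) []) none (some (j+1))).sum)))
      (A ++ rowE n :: B'))
    = A ++ prefRow prev :: B' := by
  have hlen : iN < (A ++ rowE n :: B').length := by
    rw [List.length_append, List.length_cons]; omega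
  conv_lhs => rw [show A ++ rowE n :: B' = (A ++ rowE n :: B').set iN (rowE n) from by
    rw [← hA]; exact (set_append_len A (rowE n) (rowE n) B').symm]
  rw [row_local i iN hi hi1 _ hlen, hprev]
  have hrow : (PySem.List.pyRange 1 n 1).foldl (fun row j => PySem.List.pySetD row j
      ((PySem.List.slice prev none (some (j+1))).sum)) (rowE n) = prefRow prev := by
    have h2 := setmap_loop (0 : Int)
      (fun j _ => (PySem.List.slice prev none (some (j+1))).sum)
      (List.replicate (n.toNat - 1) (0 : Int)) [1]
    simp only [List.length_cons, List.length_nil, List.length_replicate, Nat.cast_one,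
      List.singleton_append, zero_add] at h2
    rw [show (1 : Int) + ((n.toNat - 1 : Nat) : Int) = n from by omega] at h2
    have h2' : (PySem.List.pyRange 1 n 1).foldl (fun row j => PySem.List.pySetD row j
        ((PySem.List.slice prev none (some (j+1))).sum)) (rowE n)
        = 1 :: (List.replicate (n.toNat - 1) (0 : Int)).mapIdx
            (fun m _ => (PySem.List.slice prev none (some ((1 : Int) + (m : Int) + 1))).sum) := h2
    rw [h2', mapIdx_fun_const, List.length_replicate]
    rw [pref_eq, hpl, show n.toNat = (n.toNat - 1) + 1 from by omega, List.range_succ_eq_map]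
    simp only [List.map_cons, List.map_map]
    congr 1
    · rw [show prev.take 1 = [1] from hp1]; simp
    · apply List.map_congr_left
      intro m _
      simp only [Function.comp]
      rw [PySem.List.slice_to prev (by omega : (0:Int) ≤ 1 + (m : Int) + 1),
        show ((1:Int) + (m : Int) + 1).toNat = m + 1 + 1 from by omega]
  rw [hrow, ← hA, set_append_len]

-- A's outer i-loop: after m iterations rows 0..m are gg n 0..m, the rest still rowE.
lemma outer_loop (k n : Int) (hk : 0 ≤ k) (hn : 1 ≤ n) :
    ∀ m : Nat, (m : Int) ≤ k →
    ((PySem.List.pyRange 1 (1 + (m : Int)) 1).foldl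
      (fun r i => (PySem.List.pyRange 1 n 1).foldl
        (fun r j => PySem.List.pySetD r i (PySem.List.pySetD (PySem.List.pyGetD r i []) j
          ((PySem.List.slice (PySem.List.pyGetD r (i-1) []) none (some (j+1))).sum))) r)
      (gg n 0 :: List.replicate k.toNat (rowE n)))
    = (List.range (m+1)).map (gg n) ++ List.replicate (k.toNat - m) (rowE n) := by
  intro m
  induction m with
  | zero =>
    intro _
    simp [List.range_one]
  | succ m ih =>
    intro hm1
    have hm : (m : Int) ≤ k := by push_cast at hm1 ⊢; omega
    rw [show (1 : Int) + ((m+1 : Nat) : Int) = (1 + (m : Int)) + 1 from by push_cast; ring,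
      PySem.List.pyRange_one_succ_right (by omega : (1:Int) ≤ 1 + (m : Int)),
      List.foldl_append, ih hm, List.foldl_cons, List.foldl_nil]
    have hkm : k.toNat - m = (k.toNat - (m+1)) + 1 := by omega
    rw [hkm, List.replicate_succ]
    have hprev : PySem.List.pyGetD
        ((List.range (m+1)).map (gg n) ++ rowE n :: List.replicate (k.toNat - (m+1)) (rowE n))
        ((1 + (m : Int)) - 1) [] = gg n m := by
      rw [show (1 + (m : Int)) - 1 = ((m : Nat) : Int) from by ring, PySem.List.pyGetD_natCast]
      simp [List.getD_eq_getElem?_getD, List.getElem?_append_left]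
    rw [inner_step n hn (gg n m) (gg_length n hn m) (gg_take1 n hn m)
      (1 + (m : Int)) (m+1) (by push_cast; ring) (by omega)
      ((List.range (m+1)).map (gg n)) (List.replicate (k.toNat - (m+1)) (rowE n))
      (by simp) hprev]
    rw [show prefRow (gg n m) = gg n (m+1) from rfl]
    simp [List.range_succ]

lemma pySetD_zero_cons {α : Type} (a v : α) (l : List α) :
    PySem.List.pySetD (a :: l) 0 v = v :: l := by
  have h : ((0 : Nat) : Int) = (0 : Int) := rfl
  rw [← h, PySem.List.pySetD_natCast, List.set_cons_zero]

-- characterisation of A's result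
lemma apart_eq (k n : Int) (hk : 0 ≤ k) (hn : 1 ≤ n) :
    apart k n = PySem.List.pyGetD (gg n k.toNat) (n-1) 0 := by
  have e0 : apart k n = PySem.List.pyGetD (PySem.List.pyGetD
      ((PySem.List.pyRange 1 (k+1) 1).foldl (fun r i =>
        (PySem.List.pyRange 1 n 1).foldl (fun r j =>
          PySem.List.pySetD r i (PySem.List.pySetD (PySem.List.pyGetD r i []) j
            ((PySem.List.slice (PySem.List.pyGetD r (i-1) []) none (some (j+1))).sum))) r)
        ((PySem.List.pyRange 0 (k+1) 1).foldl (fun r i =>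
          PySem.List.pySetD r i (PySem.List.pySetD (PySem.List.pyGetD r i []) 0 1))
          (PySem.List.pySetD
            ((PySem.List.pyRange 0 (k+1) 1).foldl (fun res1 _i =>
              res1 ++ [(PySem.List.pyRange 0 n 1).foldl (fun line _j => line ++ [(0 : Int)]) []]) [])
            0 ((PySem.List.pyRange 1 (n+1) 1).map (fun x => x)))))
      (k+1-1) []) (n-1) 0 := rfl
  rw [e0]
  -- step 1: the zeros table
  have hline : (PySem.List.pyRange 0 n 1).foldl (fun line _j => line ++ [(0 : Int)]) []
      = List.replicate n.toNat 0 := by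
    have h := PySem.List.foldl_append_singleton_eq_map (fun _ : Int => (0 : Int))
      (PySem.List.pyRange 0 n 1) []
    have h' : (PySem.List.pyRange 0 n 1).foldl (fun line _j => line ++ [(0 : Int)]) []
        = [] ++ (PySem.List.pyRange 0 n 1).map (fun _ => (0 : Int)) := h
    rw [h', List.nil_append, List.map_const', PySem.List.length_pyRange_one,
      show (n - 0).toNat = n.toNat from by omega]
  rw [hline]
  have htab : (PySem.List.pyRange 0 (k+1) 1).foldl (fun res1 _i =>
      res1 ++ [List.replicate n.toNat (0 : Int)]) []
      = List.replicate (k.toNat + 1) (List.replicate n.toNat (0 : Int)) := by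
    have h := PySem.List.foldl_append_singleton_eq_map
      (fun _ : Int => List.replicate n.toNat (0 : Int)) (PySem.List.pyRange 0 (k+1) 1) []
    have h' : (PySem.List.pyRange 0 (k+1) 1).foldl (fun res1 _i =>
        res1 ++ [List.replicate n.toNat (0 : Int)]) []
        = [] ++ (PySem.List.pyRange 0 (k+1) 1).map (fun _ => List.replicate n.toNat (0 : Int)) := h
    rw [h', List.nil_append, List.map_const', PySem.List.length_pyRange_one,
      show (k + 1 - 0).toNat = k.toNat + 1 from by omega]
  rw [htab]
  -- step 2: install row 0
  rw [show (PySem.List.pyRange 1 (n+1) 1).map (fun x => x) = gg n 0 from by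
    simp [gg]]
  rw [List.replicate_succ, pySetD_zero_cons]
  -- step 3: the col-0 loop
  have hcol : (PySem.List.pyRange 0 (k+1) 1).foldl (fun r i =>
      PySem.List.pySetD r i (PySem.List.pySetD (PySem.List.pyGetD r i []) 0 1))
      (gg n 0 :: List.replicate k.toNat (List.replicate n.toNat (0 : Int)))
      = gg n 0 :: List.replicate k.toNat (rowE n) := by
    have h := setmap_loop ([] : List Int) (fun _ row => PySem.List.pySetD row 0 1)
      (gg n 0 :: List.replicate k.toNat (List.replicate n.toNat (0 : Int))) []
    simp only [List.length_nil, Nat.cast_zero, List.nil_append, zero_add, List.length_cons,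
      List.length_replicate] at h
    rw [show ((k.toNat + 1 : Nat) : Int) = k + 1 from by omega] at h
    have h' : (PySem.List.pyRange 0 (k+1) 1).foldl (fun r i =>
        PySem.List.pySetD r i (PySem.List.pySetD (PySem.List.pyGetD r i []) 0 1))
        (gg n 0 :: List.replicate k.toNat (List.replicate n.toNat (0 : Int)))
        = (gg n 0 :: List.replicate k.toNat (List.replicate n.toNat (0 : Int))).mapIdx
            (fun _ row => PySem.List.pySetD row 0 1) := h
    rw [h', mapIdx_fun_id (fun row => PySem.List.pySetD row 0 1)]
    have hz : PySem.List.pySetD (List.replicate n.toNat (0 : Int)) 0 1 = rowE n := by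
      rw [show n.toNat = (n.toNat - 1) + 1 from by omega, List.replicate_succ, pySetD_zero_cons]
      rfl
    have h0 : PySem.List.pySetD (gg n 0) 0 1 = gg n 0 := by
      show PySem.List.pySetD (PySem.List.pyRange 1 (n+1) 1) 0 1 = PySem.List.pyRange 1 (n+1) 1
      rw [PySem.List.pyRange_one_cons (by omega : (1:Int) < n+1), pySetD_zero_cons]
    simp [List.map_replicate, hz, h0]
  rw [hcol]
  -- step 4: the main loop
  rw [show k + 1 = 1 + ((k.toNat : Nat) : Int) from by omega]
  rw [outer_loop k n hk hn k.toNat (by omega)]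
  simp only [Nat.sub_self, List.replicate_zero, List.append_nil]
  -- index row k
  rw [show (1 : Int) + ((k.toNat : Nat) : Int) - 1 = ((k.toNat : Nat) : Int) from by ring,
    PySem.List.pyGetD_natCast]
  simp [List.getD_eq_getElem?_getD]

-- characterisation of B's result
lemma alt_eq (k n : Int) (hk : 0 ≤ k) :
    apart_alt k n = PySem.List.pyGetD (gg n k.toNat) (-1) 0 := by
  have e0 : apart_alt k n = PySem.List.pyGetD
      ((PySem.List.pyRange 0 k 1).foldl (fun row _ => prefRow row)
        (PySem.List.pyRange 1 (n+1) 1)) (-1) 0 := rfl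
  rw [e0]
  have hfold : ∀ m : Nat, (PySem.List.pyRange 0 (m : Int) 1).foldl (fun row _ => prefRow row)
      (PySem.List.pyRange 1 (n+1) 1) = gg n m := by
    intro m
    induction m with
    | zero => simp [gg]
    | succ m ih =>
      rw [show ((m+1 : Nat) : Int) = (m : Int) + 1 from by push_cast; ring,
        PySem.List.pyRange_one_succ_right (by omega : (0:Int) ≤ (m : Int)),
        List.foldl_append, ih, List.foldl_cons, List.foldl_nil]
      rfl
  conv_lhs => rw [show k = ((k.toNat : Nat) : Int) from by omega]
  rw [hfold k.toNat]

-- ===== VERDICT (by name: the statement is the Claim_ definition above) =====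
theorem apart_spec : Claim_equal_apart := by
  intro k n _ hpre
  obtain ⟨hk, hn⟩ := hpre
  unfold Spec_apart
  rw [apart_eq k n hk hn, alt_eq k n hk]
  have hlen := gg_length n hn k.toNat
  have hne : gg n k.toNat ≠ [] := by
    intro h; rw [h] at hlen; simp at hlen; omega
  rw [PySem.List.pyGetD_neg_one _ _ hne,
    show n - 1 = ((n.toNat - 1 : Nat) : Int) from by omega, PySem.List.pyGetD_natCast,
    List.getLast_eq_getElem,
    List.getD_eq_getElem _ _ (show n.toNat - 1 < (gg n k.toNat).length from by omega)]
  simp only [hlen]
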